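-- pv_equiv track=rewrite | github.com/jeremy63s/Crackle-Gene | src/my_project/matrix_utils.py | compute_indices
-- ===== SOURCE A (Python) =====
-- def compute_indices(aligned_seq, offset, begin):
--     """
--     Given an aligned sequence (with gaps), section offset, and beginning index,
--     compute an array of absolute indices (starting at 1) for each column; gaps get 0.
--     """
--     indices = []
--     current_index = offset + begin + 1
--     for char in aligned_seq:
--         if char == '-':
--             indices.append(0)
--         else:
--             indices.append(current_index)
--             current_index += 1
--     return indices
-- ===== SOURCE B (Python) =====
-- def _run_length(rest, is_gap):
--     # length of the maximal leading run of rest whose gap-status equals is_gap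
--     n = 0
--     while n < len(rest) and (rest[n] == '-') == is_gap:
--         n += 1
--     return n
--
--
-- def compute_indices(aligned_seq, offset, begin):
--     # Run-length decomposition: scan maximal runs of gaps / non-gaps and emit
--     # a block of zeros or a contiguous range per run, instead of a per-character
--     # loop with a mutated running index.
--     out = []
--     start = offset + begin + 1
--     rest = list(aligned_seq)
--     while rest:
--         is_gap = rest[0] == '-'
--         n = _run_length(rest, is_gap)
--         if is_gap:
--             out += [0] * n
--         else:
--             out += range(start, start + n)
--             start += n
--         rest = rest[n:]
--     return out
-- ===== Notes on version B (the rewrite author's own statement) =====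
-- stated objective: alternative
-- what changed: Replaces A's per-character loop with a mutated running index by a run-length scan: it finds each maximal run of gaps or non-gaps and bulk-emits a block of zeros ([0]*n) or a whole contiguous range(start, start+n) per run.
import Mathlib
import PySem

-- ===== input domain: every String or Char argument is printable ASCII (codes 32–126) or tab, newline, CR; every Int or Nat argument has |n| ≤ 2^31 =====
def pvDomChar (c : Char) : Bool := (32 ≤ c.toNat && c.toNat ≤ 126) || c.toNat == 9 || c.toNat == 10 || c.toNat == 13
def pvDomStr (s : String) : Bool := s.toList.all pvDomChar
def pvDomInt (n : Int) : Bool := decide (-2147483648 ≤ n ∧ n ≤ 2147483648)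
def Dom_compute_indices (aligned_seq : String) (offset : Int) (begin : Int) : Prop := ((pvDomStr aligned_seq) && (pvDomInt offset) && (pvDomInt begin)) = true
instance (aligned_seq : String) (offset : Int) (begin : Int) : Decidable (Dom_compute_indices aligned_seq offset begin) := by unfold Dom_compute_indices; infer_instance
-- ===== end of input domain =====

-- B replaces A's per-character loop with a mutated running index by a run-length scan that
-- bulk-emits a block of zeros or a whole contiguous range per maximal run (alternative decomposition).

-- ===== PORT A =====
-- for char in aligned_seq: append 0 for '-', else append current_index and bump it.
def pvLoopA (cs : List Char) (current_index : Int) : List Int :=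
  match cs with
  | [] => []
  | c :: rest =>
      if c = '-' then 0 :: pvLoopA rest current_index
      else current_index :: pvLoopA rest (current_index + 1)

def compute_indices (aligned_seq : String) (offset : Int) (begin : Int) : List Int :=
  pvLoopA aligned_seq.toList (offset + begin + 1)

-- ===== PORT B =====
-- _run_length: length of the maximal leading run whose gap-status equals is_gap
-- (Python's index scan 'while n < len(rest) and (rest[n]=='-')==is_gap' as structural recursion).
def pvRunLen (rest : List Char) (is_gap : Bool) : Nat :=
  match rest with
  | [] => 0
  | c :: t => if (decide (c = '-')) = is_gap then pvRunLen t is_gap + 1 else 0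

-- termination of the outer while loop: each run is nonempty
lemma pvRunLen_head_pos (c : Char) (t : List Char) :
    1 ≤ pvRunLen (c :: t) (decide (c = '-')) := by
  simp [pvRunLen]

-- while rest: emit [0]*n or range(start, start+n), then rest = rest[n:]
def pvOuterB (rest : List Char) (out : List Int) (start : Int) : List Int :=
  match rest with
  | [] => out
  | c :: t =>
      let is_gap : Bool := decide (c = '-')
      let n := pvRunLen (c :: t) is_gap
      if is_gap then
        pvOuterB ((c :: t).drop n) (out ++ List.replicate n 0) start
      else
        pvOuterB ((c :: t).drop n) (out ++ PySem.List.pyRange start (start + n) 1) (start + n)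
  termination_by rest.length
  decreasing_by
  · simp only [List.length_drop]
    have := pvRunLen_head_pos c t
    simp only [List.length_cons]
    omega
  · simp only [List.length_drop]
    have := pvRunLen_head_pos c t
    simp only [List.length_cons]
    omega

def compute_indices_alt (aligned_seq : String) (offset : Int) (begin : Int) : List Int :=
  pvOuterB aligned_seq.toList [] (offset + begin + 1)

-- ===== PRECONDITION & SPEC =====
def Spec_compute_indices (aligned_seq : String) (offset : Int) (begin : Int) (out : List Int) : Prop := out = compute_indices_alt aligned_seq offset begin
instance (aligned_seq : String) (offset : Int) (begin : Int) (out : List Int) : Decidable (Spec_compute_indices aligned_seq offset begin out) := by unfold Spec_compute_indices; infer_instance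

-- ===== CLAIM =====
def Claim_equal_compute_indices : Prop := ∀ (aligned_seq : String) (offset : Int) (begin : Int), Dom_compute_indices aligned_seq offset begin → Spec_compute_indices aligned_seq offset begin (compute_indices aligned_seq offset begin)

-- ===== LEMMAS AND PROOFS =====
lemma pvRunLen_le (rest : List Char) (g : Bool) : pvRunLen rest g ≤ rest.length := by
  induction rest with
  | nil => simp [pvRunLen]
  | cons c t ih => simp only [pvRunLen, List.length_cons]; split <;> omega

lemma pvRunLen_take (rest : List Char) (g : Bool) :
    ∀ c ∈ rest.take (pvRunLen rest g), decide (c = '-') = g := by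
  induction rest with
  | nil => simp
  | cons c t ih =>
    simp only [pvRunLen]
    split
    · rename_i h
      intro x hx
      simp only [List.take_succ_cons, List.mem_cons] at hx
      rcases hx with rfl | hx
      · exact h
      · exact ih x hx
    · simp

lemma pvLoopA_gap_run (seg rest : List Char) (k : Int) (h : ∀ c ∈ seg, c = '-') :
    pvLoopA (seg ++ rest) k = List.replicate seg.length 0 ++ pvLoopA rest k := by
  induction seg with
  | nil => simp
  | cons c t ih =>
    have hc : c = '-' := h c (by simp)
    simp only [List.cons_append, pvLoopA, hc, List.length_cons,
      List.replicate_succ, List.cons_append]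
    exact congrArg _ (ih (fun x hx => h x (by simp [hx])))

lemma pvLoopA_res_run (seg rest : List Char) (k : Int) (h : ∀ c ∈ seg, c ≠ '-') :
    pvLoopA (seg ++ rest) k =
      PySem.List.pyRange k (k + seg.length) 1 ++ pvLoopA rest (k + seg.length) := by
  induction seg generalizing k with
  | nil => simp [PySem.List.pyRange_one_eq_nil]
  | cons c t ih =>
    have hc : c ≠ '-' := h c (by simp)
    have hrange : PySem.List.pyRange k (k + ((t.length : Int) + 1)) 1 =
        k :: PySem.List.pyRange (k + 1) (k + ((t.length : Int) + 1)) 1 :=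
      PySem.List.pyRange_one_cons (by omega)
    simp only [List.cons_append, pvLoopA, if_neg hc, List.length_cons]
    push_cast
    rw [hrange]
    have harith : k + ((t.length : Int) + 1) = k + 1 + (t.length : Int) := by ring
    rw [harith]
    simp only [List.cons_append]
    exact congrArg _ (ih (k + 1) (fun x hx => h x (by simp [hx])))

lemma pvOuterB_eq (rest : List Char) (out : List Int) (start : Int) :
    pvOuterB rest out start = out ++ pvLoopA rest start := by
  induction hL : rest.length using Nat.strong_induction_on generalizing rest out start with
  | _ L ih =>
  match rest with
  | [] => simp [pvOuterB, pvLoopA]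
  | c :: t =>
    simp only [List.length_cons] at hL
    by_cases hc : c = '-'
    · have hd : (decide (c = '-')) = true := by simp [hc]
      set n := pvRunLen (c :: t) true with hn
      have hn1 : 1 ≤ n := by have := pvRunLen_head_pos c t; rwa [hd] at this
      have hnle : n ≤ t.length + 1 := by
        have := pvRunLen_le (c :: t) true; simpa using this
      have hdroplen : ((c :: t).drop n).length < L := by
        simp only [List.length_drop, List.length_cons]; omega
      have htlen : ((c :: t).take n).length = n := by
        simp only [List.length_take, List.length_cons]; omega
      have hall : ∀ x ∈ (c :: t).take n, x = '-' := by
        intro x hx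
        have := pvRunLen_take (c :: t) true x (by exact hx)
        simpa using this
      have hstep : pvOuterB (c :: t) out start =
          pvOuterB ((c :: t).drop n) (out ++ List.replicate n 0) start := by
        rw [pvOuterB]; simp only [hd, ← hn, if_true]
      rw [hstep, ih _ hdroplen _ _ _ rfl]
      conv_rhs => rw [show c :: t = (c :: t).take n ++ (c :: t).drop n from (List.take_append_drop n _).symm]
      rw [pvLoopA_gap_run _ _ _ hall, htlen, List.append_assoc]
    · have hd : (decide (c = '-')) = false := by simp [hc]
      set n := pvRunLen (c :: t) false with hn
      have hn1 : 1 ≤ n := by have := pvRunLen_head_pos c t; rwa [hd] at this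
      have hnle : n ≤ t.length + 1 := by
        have := pvRunLen_le (c :: t) false; simpa using this
      have hdroplen : ((c :: t).drop n).length < L := by
        simp only [List.length_drop, List.length_cons]; omega
      have htlen : ((c :: t).take n).length = n := by
        simp only [List.length_take, List.length_cons]; omega
      have hall : ∀ x ∈ (c :: t).take n, x ≠ '-' := by
        intro x hx
        have := pvRunLen_take (c :: t) false x (by exact hx)
        simpa using this
      have hstep : pvOuterB (c :: t) out start =
          pvOuterB ((c :: t).drop n)
            (out ++ PySem.List.pyRange start (start + n) 1) (start + n) := by
        rw [pvOuterB]; simp only [hd, ← hn, Bool.false_eq_true, if_false]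
      rw [hstep, ih _ hdroplen _ _ _ rfl]
      conv_rhs => rw [show c :: t = (c :: t).take n ++ (c :: t).drop n from (List.take_append_drop n _).symm]
      rw [pvLoopA_res_run _ _ _ hall, htlen, List.append_assoc]

-- ===== VERDICT =====
theorem compute_indices_spec : Claim_equal_compute_indices := by
  intro s offset begin _
  unfold Spec_compute_indices compute_indices compute_indices_alt
  rw [pvOuterB_eq]
  simp
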